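-- pv_equiv track=rewrite | github.com/jordanhubbard/Theseus | cleanroom/python/theseus_encodings_cr/__init__.py | normalize_encoding
-- ===== SOURCE A (Python) =====
-- def normalize_encoding(encoding):
--     """
--     Normalize an encoding name.
--
--     The normalized name is lower-cased; any run of one or more
--     non-alphanumeric (and non-dot) characters is replaced by a single
--     underscore, except at the very start of the name (leading runs
--     of punctuation are dropped).
--
--     Examples::
--
--         normalize_encoding('UTF-8')       -> 'utf_8'
--         normalize_encoding('iso-8859-1')  -> 'iso_8859_1'
--         normalize_encoding('ASCII')       -> 'ascii'
--         normalize_encoding('utf_8')       -> 'utf_8'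
--     """
--     if isinstance(encoding, (bytes, bytearray)):
--         encoding = bytes(encoding).decode('ascii')
--
--     chars = []
--     punct = False
--     for c in encoding:
--         if c.isalnum() or c == '.':
--             if punct and chars:
--                 chars.append('_')
--             chars.append(c.lower())
--             punct = False
--         else:
--             punct = True
--     return ''.join(chars)
-- ===== SOURCE B (Python) =====
-- def normalize_encoding(encoding):
--     if isinstance(encoding, (bytes, bytearray)):
--         encoding = bytes(encoding).decode('ascii')
--     masked = ''.join(c if c.isalnum() or c == '.' else ' ' for c in encoding)
--     return '_'.join(masked.split()).lower()
-- ===== Notes on version B (the rewrite author's own statement) =====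
-- stated objective: simpler
-- what changed: Replaces A's stateful character loop (punct flag plus accumulator list) with a mask-split-join pipeline: non-keep characters are masked to spaces, str.split() drops the empty runs, and the tokens are joined with underscore and lowercased.
import Mathlib
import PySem

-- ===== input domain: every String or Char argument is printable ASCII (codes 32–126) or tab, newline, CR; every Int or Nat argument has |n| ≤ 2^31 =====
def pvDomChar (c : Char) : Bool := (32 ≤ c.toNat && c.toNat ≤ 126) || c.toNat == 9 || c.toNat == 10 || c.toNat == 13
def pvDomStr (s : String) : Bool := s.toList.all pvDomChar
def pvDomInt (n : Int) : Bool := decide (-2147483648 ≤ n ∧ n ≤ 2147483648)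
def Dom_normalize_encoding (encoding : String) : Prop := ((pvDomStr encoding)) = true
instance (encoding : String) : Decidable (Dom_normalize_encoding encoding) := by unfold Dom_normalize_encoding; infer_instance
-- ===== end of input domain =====

-- B replaces A's stateful character loop (punct flag + accumulator) with a
-- mask-to-spaces / whitespace-split / '_'-join / lower pipeline (objective: simpler).
-- The bytes/bytearray decode prolog of A is outside the String-typed port.

-- ===== PORT A =====
-- A's loop, state (chars, punct); a char is kept iff it is alnum or '.'.
def normalize_encoding (encoding : String) : String :=
  String.mk (encoding.toList.foldl (fun st c =>
    if PySem.Chars.isalnum c || c == '.' then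
      ((if st.2 && !st.1.isEmpty then st.1 ++ ['_'] else st.1) ++ [PySem.Chars.lowerChar c], false)
    else (st.1, true)) ([], false)).1

-- ===== PORT B =====
-- Source B: mask non-keep chars to ' ', whitespace-split, join with '_', lower.
def normalize_encoding_alt (encoding : String) : String :=
  String.mk (PySem.Chars.lower (PySem.Chars.join ['_'] (PySem.Chars.split₀
    (encoding.toList.map (fun c => if PySem.Chars.isalnum c || c == '.' then c else ' ')))))

-- ===== PRECONDITION & SPEC =====
def Spec_normalize_encoding (encoding : String) (out : String) : Prop := out = normalize_encoding_alt encoding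
instance (encoding : String) (out : String) : Decidable (Spec_normalize_encoding encoding out) := by unfold Spec_normalize_encoding; infer_instance

-- ===== CLAIM (what is proved, stated in full; the proofs are below) =====
def Claim_equal_normalize_encoding : Prop := ∀ (encoding : String), Dom_normalize_encoding encoding → Spec_normalize_encoding encoding (normalize_encoding encoding)

-- ===== LEMMAS AND PROOFS =====

/-- the "kept" characters of both programs -/
def pvKeep (c : Char) : Bool := PySem.Chars.isalnum c || c == '.'

/-- canonical recursion both programs compute: p = punct flag, ne = "output nonempty" -/
def pvNorm : List Char → Bool → Bool → List Char
  | [], _, _ => []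
  | c :: l, p, ne =>
    if pvKeep c then (if p && ne then ['_'] else []) ++ PySem.Chars.lowerChar c :: pvNorm l false true
    else pvNorm l true ne

lemma pvCharLe (a b : Char) : a ≤ b ↔ a.toNat ≤ b.toNat := ge_iff_le

lemma pvKeep_not_space (c : Char) (h : pvKeep c = true) : PySem.Chars.isspace c = false := by
  rw [pvKeep, Bool.or_eq_true, beq_iff_eq] at h
  rcases h with h | rfl
  · simp only [PySem.Chars.isalnum, PySem.Chars.isalpha, PySem.Chars.isdigit,
      PySem.Chars.isupper, PySem.Chars.islower, pvCharLe, Bool.or_eq_true, Bool.and_eq_true,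
      decide_eq_true_eq, (show 'A'.toNat = 65 from rfl), (show 'Z'.toNat = 90 from rfl),
      (show 'a'.toNat = 97 from rfl), (show 'z'.toNat = 122 from rfl),
      (show '0'.toNat = 48 from rfl), (show '9'.toNat = 57 from rfl)] at h
    simp [PySem.Chars.isspace]
    omega
  · decide

lemma pvIsEmpty_concat {α : Type} (l : List α) (x : α) (xs : List α) :
    (l ++ x :: xs).isEmpty = false := by
  cases l <;> rfl

lemma pvNorm_ne_false (l : List Char) (p q : Bool) : pvNorm l p false = pvNorm l q false := by
  induction l with
  | nil => rfl
  | cons c l ih => by_cases h : pvKeep c = true <;> simp [pvNorm, h]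

/-- A's fold computes pvNorm. -/
lemma pvFoldA (l : List Char) (acc : List Char) (p : Bool) :
    (l.foldl (fun st c =>
      if PySem.Chars.isalnum c || c == '.' then
        ((if st.2 && !st.1.isEmpty then st.1 ++ ['_'] else st.1) ++ [PySem.Chars.lowerChar c], false)
      else (st.1, true)) (acc, p)).1 = acc ++ pvNorm l p (!acc.isEmpty) := by
  induction l generalizing acc p with
  | nil => simp [pvNorm]
  | cons c l ih =>
    by_cases h : pvKeep c = true
    · have h' : (PySem.Chars.isalnum c || c == '.') = true := h
      simp only [List.foldl, h', if_true, pvNorm, h]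
      rw [ih]
      by_cases hb : (p && !acc.isEmpty) = true <;>
        simp [hb, List.append_assoc, pvIsEmpty_concat]
    · have h' : (PySem.Chars.isalnum c || c == '.') = false := by simpa [pvKeep] using h
      simp only [List.foldl, h', Bool.false_eq_true, if_false, pvNorm, h]
      exact ih acc true

/-- appending one token to a join -/
lemma pvJoin_append_singleton (sep : List Char) (xs : List (List Char)) (t : List Char) :
    PySem.Chars.join sep (xs ++ [t]) =
      (if xs.isEmpty then [] else PySem.Chars.join sep xs ++ sep) ++ t := by
  induction xs with
  | nil => simp [PySem.Chars.join_singleton]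
  | cons x xs ih =>
    cases xs with
    | nil => simp [PySem.Chars.join_cons_cons, PySem.Chars.join_singleton]
    | cons y ys =>
      conv_lhs => rw [List.cons_append, List.cons_append, PySem.Chars.join_cons_cons]
      rw [List.cons_append] at ih
      rw [ih, PySem.Chars.join_cons_cons]
      simp [List.append_assoc]

/-- extending the last token of a join -/
lemma pvJoin_append_last (sep : List Char) (xs : List (List Char)) (y z : List Char) :
    PySem.Chars.join sep (xs ++ [y ++ z]) = PySem.Chars.join sep (xs ++ [y]) ++ z := by
  rw [pvJoin_append_singleton, pvJoin_append_singleton]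
  simp [List.append_assoc]

/-- main invariant: split₀.go on the masked list, joined and lowered, computes pvNorm -/
lemma pvGoSpec (l : List Char) (cur : List Char) (acc : List (List Char)) :
    PySem.Chars.lower (PySem.Chars.join ['_'] (PySem.Chars.split₀.go
        (l.map (fun c => if PySem.Chars.isalnum c || c == '.' then c else ' ')) cur acc)) =
      (if cur.isEmpty then
        PySem.Chars.lower (PySem.Chars.join ['_'] acc.reverse) ++ pvNorm l (!acc.isEmpty) (!acc.isEmpty)
      else
        PySem.Chars.lower (PySem.Chars.join ['_'] (acc.reverse ++ [cur.reverse])) ++ pvNorm l false true) := by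
  induction l generalizing cur acc with
  | nil => cases cur <;> simp [PySem.Chars.split₀.go, pvNorm]
  | cons c l ih =>
    by_cases h : pvKeep c = true
    · have h' : (PySem.Chars.isalnum c || c == '.') = true := h
      have hsp : PySem.Chars.isspace c = false := pvKeep_not_space c h
      simp only [List.map_cons, h', if_true, PySem.Chars.split₀.go, hsp, Bool.false_eq_true,
        if_false]
      rw [ih (c :: cur) acc]
      cases cur with
      | cons x cs =>
        simp only [List.isEmpty_cons, if_false, Bool.false_eq_true]
        rw [List.reverse_cons, pvJoin_append_last]
        simp [pvNorm, h, PySem.Chars.lower]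
      | nil =>
        simp only [List.isEmpty_cons, List.isEmpty_nil, if_true, Bool.false_eq_true, if_false,
          List.reverse_cons, List.reverse_nil, List.nil_append]
        rw [pvJoin_append_singleton]
        cases acc with
        | nil => simp [pvNorm, h, PySem.Chars.lower]
        | cons a as =>
          simp [pvNorm, h, PySem.Chars.lower, (show PySem.Chars.lowerChar '_' = '_' from rfl)]
    · have h' : (PySem.Chars.isalnum c || c == '.') = false := by simpa [pvKeep] using h
      simp only [List.map_cons, h', Bool.false_eq_true, if_false, PySem.Chars.split₀.go,
        (show PySem.Chars.isspace ' ' = true from rfl), if_true]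
      cases cur with
      | cons x cs =>
        simp only [List.isEmpty_cons, if_false, Bool.false_eq_true]
        rw [ih [] ((x :: cs).reverse :: acc)]
        simp [pvNorm, h]
      | nil =>
        simp only [List.isEmpty_nil, if_true]
        rw [ih [] acc]
        cases acc with
        | nil =>
          simp only [List.isEmpty_nil, if_true, List.reverse_nil, Bool.not_true, pvNorm, h,
            Bool.false_eq_true, if_false]
          rw [pvNorm_ne_false l true false]
        | cons a as => simp [pvNorm, h]

-- ===== VERDICT (by name: the statement is the Claim_ definition above) =====
theorem normalize_encoding_spec : Claim_equal_normalize_encoding := by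
  intro encoding _
  unfold Spec_normalize_encoding normalize_encoding normalize_encoding_alt PySem.Chars.split₀
  rw [pvFoldA, pvGoSpec]
  simp [PySem.Chars.join_nil, PySem.Chars.lower]
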